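-- pv_equiv track=rewrite | github.com/sastels/advent-of-code-2023 | src/day01/day01.py | replace_last_number
-- ===== SOURCE A (Python) =====
-- numbers = {"one": "1", "two": "2", "three": "3", "four": "4", "five": "5", "six": "6", "seven": "7", "eight": "8", "nine": "9"}
--
-- def replace_last_number(s: str) -> str:
--     to_replace = ("", -1)
--     for k in numbers.keys():
--         last_k = s.rfind(k)
--         if last_k == -1:
--             continue
--         elif last_k > to_replace[1] or to_replace[1] == -1:
--             to_replace = (k, last_k)
--     if to_replace[1] == -1:
--         return s
--     else:
--         return numbers[to_replace[0]].join(s.rsplit(to_replace[0], 1))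
-- ===== SOURCE B (Python) =====
-- numbers = {"one": "1", "two": "2", "three": "3", "four": "4", "five": "5", "six": "6", "seven": "7", "eight": "8", "nine": "9"}
--
-- def replace_last_number(s: str) -> str:
--     for i in range(len(s) - 1, -1, -1):
--         for word, digit in numbers.items():
--             if s.startswith(word, i):
--                 return s[:i] + digit + s[i + len(word):]
--     return s
-- ===== Notes on version B (the rewrite author's own statement) =====
-- stated objective: idiomatic
-- what changed: Replaces A's loop over the nine dict keys with repeated s.rfind plus an rsplit/join reconstruction by a single right-to-left scan of string positions whose first startswith hit is the rightmost word start, splicing the digit in directly with slices.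
import Mathlib
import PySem

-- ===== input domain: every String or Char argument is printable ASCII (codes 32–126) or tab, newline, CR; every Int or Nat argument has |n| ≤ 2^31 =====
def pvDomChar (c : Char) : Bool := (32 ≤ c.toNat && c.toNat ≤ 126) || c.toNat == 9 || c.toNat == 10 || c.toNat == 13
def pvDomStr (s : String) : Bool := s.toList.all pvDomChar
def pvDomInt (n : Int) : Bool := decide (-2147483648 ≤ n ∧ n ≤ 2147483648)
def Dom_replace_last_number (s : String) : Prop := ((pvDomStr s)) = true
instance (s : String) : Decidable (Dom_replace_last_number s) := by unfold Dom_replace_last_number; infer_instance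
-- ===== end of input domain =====

-- B replaces A's loop over the nine dict keys with repeated rfind by a single
-- right-to-left positional scan (first startswith hit = rightmost word start); objective: idiomatic.

-- ===== PORT A =====
-- the module-level dict `numbers`, as an association list in insertion order
def pyNumbers : List (String × String) :=
  [("one","1"),("two","2"),("three","3"),("four","4"),("five","5"),
   ("six","6"),("seven","7"),("eight","8"),("nine","9")]

-- one iteration of A's `for k in numbers.keys()` loop body; state = to_replace
def aStep (cs : List Char) (acc : String × Int) (k : String) : String × Int :=
  let last_k := PySem.Chars.rfind cs k.toList
  if last_k = -1 then acc
  else if last_k > acc.2 ∨ acc.2 = -1 then (k, last_k) else acc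

-- s.rsplit(sep, 1), ported by hand (no PySem primitive): exact for sep ≠ ""
-- (one split at the last occurrence of sep, no split if sep is absent)
def pyRsplit1 (cs sep : List Char) : List (List Char) :=
  let r := PySem.Chars.rfind cs sep
  if r = -1 then [cs] else [cs.take r.toNat, cs.drop (r.toNat + sep.length)]

def replace_last_number (s : String) : String :=
  let cs := s.toList
  let tr := (pyNumbers.map Prod.fst).foldl (aStep cs) ("", -1)
  if tr.2 = -1 then s
  else
    -- numbers[to_replace[0]]: dict lookup = first matching key of the assoc list
    -- (the key is always present here, so the "" default is never used)
    String.ofList (PySem.Chars.join (((pyNumbers.find? (fun p => p.1 == tr.1)).map Prod.snd).getD "").toList (pyRsplit1 cs tr.1.toList))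

-- ===== PORT B =====
-- first (word, digit) pair with s.startswith(word, i); B's inner loop
def bFindAt (cs : List Char) (i : Nat) : Option (String × String) :=
  pyNumbers.find? (fun wd => PySem.Chars.startswith (cs.drop i) wd.1.toList)

-- B's outer loop: i runs n-1, n-2, …, 0; fuel = i+1
def bGo (cs : List Char) : Nat → List Char
  | 0 => cs
  | i+1 =>
    match bFindAt cs i with
    | some (w, d) => cs.take i ++ d.toList ++ cs.drop (i + w.toList.length)
    | none => bGo cs i

def replace_last_number_alt (s : String) : String :=
  String.ofList (bGo s.toList s.toList.length)

-- ===== PRECONDITION & SPEC =====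
def Spec_replace_last_number (s : String) (out : String) : Prop := out = replace_last_number_alt s
instance (s : String) (out : String) : Decidable (Spec_replace_last_number s out) := by unfold Spec_replace_last_number; infer_instance

-- ===== CLAIM (what is proved, stated in full; the proofs are below) =====
def Claim_equal_replace_last_number : Prop := ∀ (s : String), Dom_replace_last_number s → Spec_replace_last_number s (replace_last_number s)

-- ===== LEMMAS AND PROOFS =====

-- words of pyNumbers are nonempty and none is a prefix of another pair's word
theorem pyNumbers_ne_nil : ∀ p ∈ pyNumbers, p.1.toList ≠ [] := by decide

theorem pyNumbers_nopfx : ∀ p ∈ pyNumbers, ∀ q ∈ pyNumbers,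
    p.1.toList <+: q.1.toList → p = q := by decide

theorem pyNumbers_getD : ∀ p ∈ pyNumbers,
    ((pyNumbers.find? (fun q => q.1 == p.1)).map Prod.snd).getD "" = p.2 := by decide

-- at most one pair matches at a given position
theorem matchAt_unique (cs : List Char) (i : Nat) {p q : String × String}
    (hp : p ∈ pyNumbers) (hq : q ∈ pyNumbers)
    (hp2 : p.1.toList <+: cs.drop i) (hq2 : q.1.toList <+: cs.drop i) : p = q := by
  rcases List.prefix_or_prefix_of_prefix hp2 hq2 with h | h
  · exact pyNumbers_nopfx p hp q hq h
  · exact (pyNumbers_nopfx q hq p hp h).symm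

theorem bFindAt_none_iff (cs : List Char) (i : Nat) :
    bFindAt cs i = none ↔ ∀ p ∈ pyNumbers, ¬ p.1.toList <+: cs.drop i := by
  unfold bFindAt
  rw [List.find?_eq_none]
  constructor
  · intro h p hp hpfx
    have := h p hp
    simp [PySem.Chars.startswith_iff] at this
    exact this hpfx
  · intro h p hp
    simp [PySem.Chars.startswith_iff]
    exact h p hp

theorem bFindAt_some (cs : List Char) (i : Nat) {p : String × String}
    (h : bFindAt cs i = some p) : p ∈ pyNumbers ∧ p.1.toList <+: cs.drop i := by
  refine ⟨List.mem_of_find?_eq_some h, ?_⟩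
  have := List.find?_some h
  simpa [PySem.Chars.startswith_iff] using this

theorem bFindAt_high (cs : List Char) (i : Nat) (h : cs.length ≤ i) :
    bFindAt cs i = none := by
  rw [bFindAt_none_iff]
  intro p hp hpfx
  rw [List.drop_eq_nil_of_le h] at hpfx
  exact pyNumbers_ne_nil p hp (List.prefix_nil.mp hpfx)

-- rfind.go characterisation
theorem go_eq_neg_one (cs sub : List Char) (n : Nat)
    (h : ∀ i, ¬ sub <+: cs.drop i) : PySem.Chars.rfind.go cs sub n = -1 := by
  induction n with
  | zero =>
    simp only [PySem.Chars.rfind.go]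
    rw [if_neg]
    intro hpf
    exact h 0 (by simpa using List.isPrefixOf_iff_prefix.mp hpf)
  | succ j ih =>
    simp only [PySem.Chars.rfind.go]
    rw [if_neg, ih]
    intro hpf
    exact h (j+1) (List.isPrefixOf_iff_prefix.mp hpf)

theorem go_eq_max (cs sub : List Char) (n m : Nat)
    (hm : sub <+: cs.drop m) (hmn : m ≤ n)
    (hmax : ∀ i, m < i → ¬ sub <+: cs.drop i) :
    PySem.Chars.rfind.go cs sub n = (m : Int) := by
  induction n with
  | zero =>
    interval_cases m
    simp only [PySem.Chars.rfind.go]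
    rw [if_pos (List.isPrefixOf_iff_prefix.mpr (by simpa using hm))]
    rfl
  | succ j ih =>
    simp only [PySem.Chars.rfind.go]
    by_cases hj : m = j + 1
    · subst hj
      rw [if_pos (List.isPrefixOf_iff_prefix.mpr hm)]
    · have hml : m ≤ j := by omega
      rw [if_neg, ih hml]
      intro hpf
      exact hmax (j+1) (by omega) (List.isPrefixOf_iff_prefix.mp hpf)

theorem go_cases (cs sub : List Char) (n : Nat) :
    PySem.Chars.rfind.go cs sub n = -1 ∨
    ∃ i : Nat, i ≤ n ∧ PySem.Chars.rfind.go cs sub n = (i : Int) ∧ sub <+: cs.drop i := by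
  induction n with
  | zero =>
    simp only [PySem.Chars.rfind.go]
    split_ifs with h
    · exact Or.inr ⟨0, le_refl _, rfl, by simpa using List.isPrefixOf_iff_prefix.mp h⟩
    · exact Or.inl rfl
  | succ j ih =>
    simp only [PySem.Chars.rfind.go]
    split_ifs with h
    · exact Or.inr ⟨j+1, le_refl _, rfl, List.isPrefixOf_iff_prefix.mp h⟩
    · rcases ih with h' | ⟨i, hi, hgo, hpfx⟩
      · exact Or.inl h'
      · exact Or.inr ⟨i, by omega, hgo, hpfx⟩

-- fold characterisation
theorem fold_allneg (cs : List Char) (ks : List String) (acc : String × Int)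
    (h : ∀ k ∈ ks, PySem.Chars.rfind cs k.toList = -1) :
    ks.foldl (aStep cs) acc = acc := by
  induction ks generalizing acc with
  | nil => rfl
  | cons k ks ih =>
    simp only [List.foldl_cons]
    rw [show aStep cs acc k = acc by simp [aStep, h k (by simp)]]
    exact ih _ (fun k' hk' => h k' (by simp [hk']))

theorem fold_stuck (cs : List Char) (ks : List String) (acc : String × Int)
    (hnn : 0 ≤ acc.2)
    (h : ∀ k ∈ ks, PySem.Chars.rfind cs k.toList ≤ acc.2) :
    ks.foldl (aStep cs) acc = acc := by
  induction ks generalizing acc with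
  | nil => rfl
  | cons k ks ih =>
    simp only [List.foldl_cons]
    have hk := h k (by simp)
    have hstep : aStep cs acc k = acc := by
      simp only [aStep]
      split_ifs with h1 h2
      · rfl
      · rcases h2 with h2 | h2
        · omega
        · omega
      · rfl
    rw [hstep]
    exact ih _ hnn (fun k' hk' => h k' (by simp [hk']))

theorem fold_main (cs : List Char) (ks : List String) (acc : String × Int)
    (w : String) (m : Nat)
    (hacc : acc.2 < (m : Int)) (hw : w ∈ ks)
    (hrw : PySem.Chars.rfind cs w.toList = (m : Int))
    (hoth : ∀ k ∈ ks, k ≠ w → PySem.Chars.rfind cs k.toList < (m : Int)) :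
    ks.foldl (aStep cs) acc = (w, (m : Int)) := by
  induction ks generalizing acc with
  | nil => cases hw
  | cons k ks ih =>
    simp only [List.foldl_cons]
    by_cases hkw : k = w
    · subst hkw
      have hstep : aStep cs acc k = (k, (m : Int)) := by
        simp only [aStep]
        rw [hrw, if_neg (by omega), if_pos (Or.inl hacc)]
      rw [hstep]
      apply fold_stuck cs ks (k, (m:Int)) (by simp)
      intro k' hk'
      by_cases hk'w : k' = k
      · subst hk'w; simp [hrw]
      · exact le_of_lt (hoth k' (by simp [hk']) hk'w)
    · have hw' : w ∈ ks := by
        rcases List.mem_cons.mp hw with h | h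
        · exact absurd h.symm hkw
        · exact h
      have hk := hoth k (by simp) hkw
      have hacc' : (aStep cs acc k).2 < (m : Int) := by
        simp only [aStep]
        split_ifs with h1 h2
        · exact hacc
        · exact hk
        · exact hacc
      rw [ih _ hacc' hw' (fun k' hk' h' => hoth k' (by simp [hk']) h')]

-- bGo characterisation
theorem bGo_none (cs : List Char) (n : Nat)
    (h : ∀ i, i < n → bFindAt cs i = none) : bGo cs n = cs := by
  induction n with
  | zero => rfl
  | succ j ih =>
    simp only [bGo]
    rw [h j (by omega)]
    exact ih (fun i hi => h i (by omega))

theorem bGo_hit (cs : List Char) (n m : Nat) (w d : String)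
    (hmn : m < n) (hm : bFindAt cs m = some (w, d))
    (hnone : ∀ i, m < i → i < n → bFindAt cs i = none) :
    bGo cs n = cs.take m ++ d.toList ++ cs.drop (m + w.toList.length) := by
  induction n with
  | zero => omega
  | succ j ih =>
    simp only [bGo]
    by_cases hj : m = j
    · subst hj
      rw [hm]
    · rw [hnone j (by omega) (by omega)]
      exact ih (by omega) (fun i h1 h2 => hnone i h1 (by omega))

-- ===== VERDICT (by name: the statement is the Claim_ definition above) =====
theorem replace_last_number_spec : Claim_equal_replace_last_number := by
  intro s _
  unfold Spec_replace_last_number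
  simp only [replace_last_number, replace_last_number_alt]
  set cs := s.toList with hcs
  by_cases hall : ∀ i, i < cs.length → bFindAt cs i = none
  · -- no word occurs anywhere: both return s
    have hall' : ∀ i, bFindAt cs i = none := by
      intro i
      by_cases hi : i < cs.length
      · exact hall i hi
      · exact bFindAt_high cs i (by omega)
    have hrf : ∀ k ∈ pyNumbers.map Prod.fst, PySem.Chars.rfind cs k.toList = -1 := by
      intro k hk
      rcases List.mem_map.mp hk with ⟨p, hp, hpk⟩
      unfold PySem.Chars.rfind
      apply go_eq_neg_one
      intro i hpfx
      exact ((bFindAt_none_iff cs i).mp (hall' i)) p hp (hpk ▸ hpfx)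
    rw [fold_allneg cs _ _ hrf]
    rw [bGo_none cs _ (fun i _ => hall' i)]
    exact String.ofList_toList.symm
  · -- some word occurs: both replace at the rightmost start m
    push Not at hall
    obtain ⟨i0, hi0, hsome0⟩ := hall
    have hne : ((Finset.range cs.length).filter (fun i => (bFindAt cs i).isSome)).Nonempty :=
      ⟨i0, Finset.mem_filter.mpr ⟨Finset.mem_range.mpr hi0, Option.isSome_iff_ne_none.mpr hsome0⟩⟩
    set m := ((Finset.range cs.length).filter (fun i => (bFindAt cs i).isSome)).max' hne with hm
    have hmem := Finset.max'_mem _ hne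
    rw [← hm] at hmem
    have hmlt : m < cs.length := Finset.mem_range.mp (Finset.mem_filter.mp hmem).1
    have hmsome : (bFindAt cs m).isSome := (Finset.mem_filter.mp hmem).2
    obtain ⟨⟨w, d⟩, hwd⟩ := Option.isSome_iff_exists.mp hmsome
    have hnone : ∀ i, m < i → bFindAt cs i = none := by
      intro i hi
      by_cases hil : i < cs.length
      · by_contra hns
        have : i ∈ (Finset.range cs.length).filter (fun i => (bFindAt cs i).isSome) :=
          Finset.mem_filter.mpr ⟨Finset.mem_range.mpr hil, Option.isSome_iff_ne_none.mpr hns⟩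
        have := Finset.le_max' _ i this
        omega
      · exact bFindAt_high cs i (by omega)
    obtain ⟨hwmem, hwpfx⟩ := bFindAt_some cs m hwd
    have hnopfx : ∀ i, m < i → ∀ p ∈ pyNumbers, ¬ p.1.toList <+: cs.drop i := by
      intro i hi
      exact (bFindAt_none_iff cs i).mp (hnone i hi)
    have hrw : PySem.Chars.rfind cs w.toList = (m : Int) := by
      unfold PySem.Chars.rfind
      exact go_eq_max cs _ _ m hwpfx (by omega) (fun i hi => hnopfx i hi (w,d) hwmem)
    have hoth : ∀ k ∈ pyNumbers.map Prod.fst, k ≠ w →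
        PySem.Chars.rfind cs k.toList < (m : Int) := by
      intro k hk hkw
      rcases List.mem_map.mp hk with ⟨p, hp, hpk⟩
      unfold PySem.Chars.rfind
      rcases go_cases cs k.toList cs.length with h | ⟨i, _, hgo, hpfx⟩
      · rw [h]; omega
      · rw [hgo]
        by_cases him : i ≤ m
        · rcases Nat.lt_or_ge i m with h' | h'
          · exact_mod_cast h'
          · have hie : i = m := by omega
            rw [hie] at hpfx
            have hpe : p = (w, d) := matchAt_unique cs m hp hwmem (hpk ▸ hpfx) hwpfx
            exact absurd (by rw [← hpk, hpe]) hkw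
        · have := hnopfx i (by omega) p hp
          rw [hpk] at this
          exact absurd hpfx this
    have hwkey : w ∈ pyNumbers.map Prod.fst := List.mem_map.mpr ⟨(w,d), hwmem, rfl⟩
    rw [fold_main cs _ _ w m (by omega) hwkey hrw hoth]
    rw [if_neg (by omega)]
    rw [bGo_hit cs _ m w d hmlt hwd (fun i h1 _ => hnone i h1)]
    have hgetD : ((pyNumbers.find? (fun q => q.1 == w)).map Prod.snd).getD "" = d :=
      pyNumbers_getD (w,d) hwmem
    unfold pyRsplit1
    rw [hrw]
    rw [if_neg (by omega)]
    rw [hgetD]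
    simp [PySem.Chars.join_cons_cons, PySem.Chars.join_singleton, Int.toNat_natCast]
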